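-- pv_equiv track=rewrite | github.com/miliar/Code_Jam_Webscraper | solutions_python/solutions_year10_round0_nr3/55.py | simulate_all_rounds
-- ===== SOURCE A (Python) =====
-- def apply_one_round (k, list_of_group_sizes):
--     # apply just one round on the rollercoaster and
--     # returns the money earned and new state of queue
--     s1= sum (list_of_group_sizes)
--     if s1 <= k:
--         return s1, list_of_group_sizes
--     s = 0
--     i = 0
--     while s+list_of_group_sizes[i] <= k:
--         s += list_of_group_sizes[i]
--         i += 1
--     return s, list_of_group_sizes[i:] + list_of_group_sizes[:i]
--
-- def apply_N_rounds (k, list_of_group_sizes):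
--     # applies enough number of rounds on the roller coaster
--     # until state of queue must repeat itself
--     # returns a list of queue state and money earned after every round applied
--     N = len(list_of_group_sizes)
--     states = []
--     money_earned_so_far = 0
--     current_round = 0
--
--     for curr_round in range(N+10):
--         states.append((money_earned_so_far, tuple(list_of_group_sizes)))
--         curr_money, list_of_group_sizes = apply_one_round (k, list_of_group_sizes)
--         money_earned_so_far += curr_money
--
--     return states
--
-- def simulate_all_rounds (R, k, list_of_group_sizes):
--     # make an efficient simulation of running the coaster R times
--     N = len(list_of_group_sizes)
--     states = apply_N_rounds (k, list_of_group_sizes)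
--     if R <= len(states)-1:
--         return states[R][0]
--     else:
--         last_reached_queue_state =states[-1][1]
--         i = len(states)-2
--         while states[i][1] != last_reached_queue_state:
--             i -=1
--         len_of_repeating_cycle = len(states)-1-i
--         money_through_cycle = states[-1][0] - states[i][0]
--         n_cycles = (R-i) // len_of_repeating_cycle
--         money_earned_so_far = states[i][0] + n_cycles*money_through_cycle
--         last_round_reached = i + n_cycles*len_of_repeating_cycle
--         more_rounds_needed = R - last_round_reached
--         assert more_rounds_needed >=0
--         list_of_group_sizes = states[-1][1]
--         for i in range (more_rounds_needed):
--             curr_money, list_of_group_sizes = apply_one_round (k, list_of_group_sizes)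
--             money_earned_so_far += curr_money
--         return money_earned_so_far
-- ===== SOURCE B (Python) =====
-- def simulate_all_rounds(R, k, list_of_group_sizes):
--     # Functional-graph re-implementation: queue states are rotations of the
--     # original list, so track only the start index; precompute per-position
--     # earnings/next-position, then jump over the detected cycle in O(1).
--     a = list_of_group_sizes
--     N = len(a)
--     if R <= 0 or N == 0:
--         return 0
--     total = sum(a)
--     if total <= k:
--         return R * total
--     earn = [0] * N
--     nxt = [0] * N
--     for p in range(N):
--         s = 0
--         i = 0
--         while s + a[(p + i) % N] <= k:
--             s += a[(p + i) % N]
--             i += 1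
--         earn[p] = s
--         nxt[p] = (p + i) % N
--     seen = {}
--     pos = 0
--     money = 0
--     r = 0
--     while r < R and pos not in seen:
--         seen[pos] = (r, money)
--         money += earn[pos]
--         pos = nxt[pos]
--         r += 1
--     if r < R:
--         r0, m0 = seen[pos]
--         cyc = r - r0
--         gain = money - m0
--         n = (R - r) // cyc
--         money += n * gain
--         r += n * cyc
--         while r < R:
--             money += earn[pos]
--             pos = nxt[pos]
--             r += 1
--     return money
-- ===== Notes on version B (the rewrite author's own statement) =====
-- stated objective: alternative
-- what changed: B replaces A's fixed-horizon simulation of N+10 full queue states plus backward scan for a repeat by a functional-graph formulation: queue states are rotations of the input, so B precomputes per-start-position (earnings, next position) once, walks positions with a first-visit dictionary until the first repeat, and jumps over the cycle in O(1); sum<=k and empty-queue cases are closed forms.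
-- intended difference: For negative R (with -(N+10) <= R so A does not raise), A returns states[R][0] via Python negative-index wraparound, i.e. the earnings after N+10+R simulated rounds; B returns 0, the intended earnings after no rounds. — e.g. on simulate_all_rounds(-1, 1, [1]): A returns 10, B returns 0
import Mathlib
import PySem

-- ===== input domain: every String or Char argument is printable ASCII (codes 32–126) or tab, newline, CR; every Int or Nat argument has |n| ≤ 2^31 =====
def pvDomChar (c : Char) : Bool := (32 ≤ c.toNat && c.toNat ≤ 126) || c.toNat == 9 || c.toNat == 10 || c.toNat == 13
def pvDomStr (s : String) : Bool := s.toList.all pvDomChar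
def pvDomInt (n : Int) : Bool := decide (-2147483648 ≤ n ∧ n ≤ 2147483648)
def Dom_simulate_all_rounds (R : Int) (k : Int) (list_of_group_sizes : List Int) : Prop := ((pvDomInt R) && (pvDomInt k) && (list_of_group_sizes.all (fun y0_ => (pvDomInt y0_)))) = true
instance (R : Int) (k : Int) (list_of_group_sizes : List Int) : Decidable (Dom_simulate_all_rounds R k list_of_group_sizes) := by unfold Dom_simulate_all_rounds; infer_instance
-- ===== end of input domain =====

-- B replaces A's fixed-horizon state simulation + backward repeat scan by a rotation-index
-- functional graph with a first-visit dictionary and an O(1) cycle jump (objective: alternative).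

-- ===== PORT A =====

-- sum(list_of_group_sizes)
def pySumA (l : List Int) : Int := l.foldl (· + ·) 0

-- 'while s + list_of_group_sizes[i] <= k' of apply_one_round; Python raises IndexError
-- past the end — only reachable when sum(list) <= k, which the caller has excluded,
-- so the out-of-range case returns the current (s, i) (unreachable at the call site).
def aorScan (k : Int) (a : List Int) (s : Int) (i : Nat) : Int × Nat :=
  if h : i < a.length then
    if s + a[i] ≤ k then aorScan k a (s + a[i]) (i + 1) else (s, i)
  else (s, i)
termination_by a.length - i

def apply_one_round (k : Int) (a : List Int) : Int × List Int :=
  let s1 := pySumA a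
  if s1 ≤ k then (s1, a)
  else
    let si := aorScan k a 0 0
    -- list[i:] + list[:i] with 0 ≤ i ≤ len: exact as drop/take
    (si.1, a.drop si.2 ++ a.take si.2)

-- the 'for curr_round in range(N+10)' loop of apply_N_rounds
def anrGo (k : Int) : Nat → List Int → Int → List (Int × List Int) → List (Int × List Int)
  | 0, _, _, states => states
  | n + 1, q, m, states =>
    let st := apply_one_round k q
    anrGo k n st.2 (m + st.1) (states ++ [(m, q)])

def apply_N_rounds (k : Int) (a : List Int) : List (Int × List Int) :=
  anrGo k (a.length + 10) a 0 []

-- 'while states[i][1] != last_reached_queue_state: i -= 1' (negative i wraps, as in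
-- Python); fuel bounds the scan; exhaustion is unreachable at the call site.
def backScan (states : List (Int × List Int)) (last : List Int) : Int → Nat → Int
  | i, 0 => i
  | i, fuel + 1 =>
    match PySem.List.pyGet? states i with
    | none => i      -- Python: IndexError (outside Pre_)
    | some st => if st.2 ≠ last then backScan states last (i - 1) fuel else i

-- 'for i in range(more_rounds_needed)' remainder loop
def remGo (k : Int) : Nat → List Int → Int → Int
  | 0, _, m => m
  | n + 1, q, m =>
    let st := apply_one_round k q
    remGo k n st.2 (m + st.1)

def simulate_all_rounds (R : Int) (k : Int) (list_of_group_sizes : List Int) : Int :=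
  let states := apply_N_rounds k list_of_group_sizes
  if R ≤ (states.length : Int) - 1 then
    match PySem.List.pyGet? states R with
    | some st => st.1
    | none => 0   -- Python: IndexError (outside Pre_)
  else
    match PySem.List.pyGet? states (-1) with
    | none => 0   -- unreachable: states is never empty
    | some lastSt =>
      let i := backScan states lastSt.2 ((states.length : Int) - 2) (2 * states.length + 2)
      match PySem.List.pyGet? states i with
      | none => 0   -- unreachable at the call site
      | some stI =>
        let L := (states.length : Int) - 1 - i
        let mc := lastSt.1 - stI.1
        let n := PySem.Int.floordiv (R - i) L
        let more := R - (i + n * L)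
        remGo k more.toNat lastSt.2 (stI.1 + n * mc)

-- ===== PORT B =====

-- 'while s + a[(p+i) % N] <= k' of the per-position table; the IndexError branch is
-- unreachable (0 ≤ (p+i) % N < N) and fuel exhaustion is unreachable when sum(a) > k.
def bScan (k : Int) (a : List Int) (N : Int) (p : Int) : Int → Int → Nat → Int × Int
  | s, i, 0 => (s, i)
  | s, i, fuel + 1 =>
    match PySem.List.pyGet? a (PySem.Int.mod (p + i) N) with
    | none => (s, i)
    | some x => if s + x ≤ k then bScan k a N p (s + x) (i + 1) fuel else (s, i)

-- 'for p in range(N): earn[p] = s; nxt[p] = (p+i) % N' as one table of pairs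
def bTable (k : Int) (a : List Int) (N : Int) : List (Int × Int) :=
  (List.range N.toNat).map (fun (p : Nat) =>
    let si := bScan k a N (p : Int) 0 0 (a.length + 1)
    (si.1, PySem.Int.mod ((p : Int) + si.2) N))

-- 'while r < R and pos not in seen'
def bLoop1 (R : Int) (en : List (Int × Int)) (seen : PySem.Dict Int (Int × Int))
    (pos money r : Int) : PySem.Dict Int (Int × Int) × Int × Int × Int :=
  if h : r < R ∧ ¬ seen.contains pos then
    match PySem.List.pyGet? en pos with
    | none => (seen, pos, money, r)   -- IndexError, unreachable: 0 ≤ pos < N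
    | some e => bLoop1 R en (seen.insert pos (r, money)) e.2 (money + e.1) (r + 1)
  else (seen, pos, money, r)
termination_by (R - r).toNat
decreasing_by omega

-- the final 'while r < R' remainder loop
def bLoop2 (R : Int) (en : List (Int × Int)) (pos money r : Int) : Int :=
  if h : r < R then
    match PySem.List.pyGet? en pos with
    | none => money   -- IndexError, unreachable
    | some e => bLoop2 R en e.2 (money + e.1) (r + 1)
  else money
termination_by (R - r).toNat
decreasing_by omega

def simulate_all_rounds_alt (R : Int) (k : Int) (list_of_group_sizes : List Int) : Int :=
  let a := list_of_group_sizes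
  let N : Int := a.length
  if R ≤ 0 ∨ N = 0 then 0
  else
    let total := a.foldl (· + ·) 0   -- sum(a)
    if total ≤ k then R * total
    else
      let en := bTable k a N
      let res := bLoop1 R en PySem.Dict.empty 0 0 0
      if res.2.2.2 < R then
        match res.1.get? res.2.1 with
        | none => res.2.2.1   -- KeyError, unreachable: the loop exited on 'pos in seen'
        | some rm =>
          let cyc := res.2.2.2 - rm.1
          let n := PySem.Int.floordiv (R - res.2.2.2) cyc
          bLoop2 R en res.2.1 (res.2.2.1 + n * (res.2.2.1 - rm.2)) (res.2.2.2 + n * cyc)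
      else res.2.2.1

-- ===== PRECONDITION & SPEC =====

-- Pre_ excludes exactly the inputs where A raises IndexError: the empty queue with
-- k < 0 (the boarding scan indexes an empty list), and R below -(len+10) (states[R]
-- is out of range even with Python's negative indexing).
def Pre_simulate_all_rounds (R : Int) (k : Int) (list_of_group_sizes : List Int) : Prop :=
  (list_of_group_sizes = [] → 0 ≤ k) ∧ -((list_of_group_sizes.length : Int) + 10) ≤ R

instance (R : Int) (k : Int) (list_of_group_sizes : List Int) : Decidable (Pre_simulate_all_rounds R k list_of_group_sizes) := by unfold Pre_simulate_all_rounds; infer_instance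

def pvWitness_simulate_all_rounds : Int × Int × List Int := (7, 4, [1, 2, 1])

-- For negative R (with -(len+10) ≤ R so A does not raise), A returns states[R][0] via
-- Python negative-index wraparound, i.e. the earnings after len+10+R simulated rounds;
-- B returns 0, the intended earnings after no rounds.
def D_simulate_all_rounds (R : Int) (k : Int) (list_of_group_sizes : List Int) : Prop := R < 0

instance (R : Int) (k : Int) (list_of_group_sizes : List Int) : Decidable (D_simulate_all_rounds R k list_of_group_sizes) := by unfold D_simulate_all_rounds; infer_instance

def Spec_simulate_all_rounds (R : Int) (k : Int) (list_of_group_sizes : List Int) (out : Int) : Prop := ¬ D_simulate_all_rounds R k list_of_group_sizes → out = simulate_all_rounds_alt R k list_of_group_sizes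

instance (R : Int) (k : Int) (list_of_group_sizes : List Int) (out : Int) : Decidable (Spec_simulate_all_rounds R k list_of_group_sizes out) := by unfold Spec_simulate_all_rounds; infer_instance

def pvDiffWitness_simulate_all_rounds : Int × Int × List Int := (-1, 1, [1])

def pvDiffWitnessOut_simulate_all_rounds : Int × Int := (10, 0)

-- ===== CLAIM (what is proved, stated in full; the proofs are below) =====
def Claim_unchanged_simulate_all_rounds : Prop := ∀ (R : Int) (k : Int) (list_of_group_sizes : List Int), Dom_simulate_all_rounds R k list_of_group_sizes → Pre_simulate_all_rounds R k list_of_group_sizes → Spec_simulate_all_rounds R k list_of_group_sizes (simulate_all_rounds R k list_of_group_sizes)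

def Claim_changed_simulate_all_rounds : Prop := Dom_simulate_all_rounds (pvDiffWitness_simulate_all_rounds.1) (pvDiffWitness_simulate_all_rounds.2.1) (pvDiffWitness_simulate_all_rounds.2.2) ∧ Pre_simulate_all_rounds (pvDiffWitness_simulate_all_rounds.1) (pvDiffWitness_simulate_all_rounds.2.1) (pvDiffWitness_simulate_all_rounds.2.2) ∧ D_simulate_all_rounds (pvDiffWitness_simulate_all_rounds.1) (pvDiffWitness_simulate_all_rounds.2.1) (pvDiffWitness_simulate_all_rounds.2.2) ∧ simulate_all_rounds (pvDiffWitness_simulate_all_rounds.1) (pvDiffWitness_simulate_all_rounds.2.1) (pvDiffWitness_simulate_all_rounds.2.2) = pvDiffWitnessOut_simulate_all_rounds.1 ∧ simulate_all_rounds_alt (pvDiffWitness_simulate_all_rounds.1) (pvDiffWitness_simulate_all_rounds.2.1) (pvDiffWitness_simulate_all_rounds.2.2) = pvDiffWitnessOut_simulate_all_rounds.2 ∧ pvDiffWitnessOut_simulate_all_rounds.1 ≠ pvDiffWitnessOut_simulate_all_rounds.2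

-- ===== LEMMAS AND PROOFS =====

-- The reference semantics both proofs reduce to: queue state and cumulated earnings
-- after t rounds of apply_one_round.
def nextQ (k : Int) (q : List Int) : List Int := (apply_one_round k q).2
def earnQ (k : Int) (q : List Int) : Int := (apply_one_round k q).1

def stateAt (k : Int) (a : List Int) : Nat → List Int
  | 0 => a
  | t + 1 => nextQ k (stateAt k a t)

def moneyAt (k : Int) (a : List Int) : Nat → Int
  | 0 => 0
  | t + 1 => moneyAt k a t + earnQ k (stateAt k a t)


-- ---- basic facts about the step function ----

theorem pySumA_eq (l : List Int) : pySumA l = l.sum := by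
  simp [pySumA, List.sum_eq_foldl]

theorem aorScan_le (k : Int) (a : List Int) : ∀ s (i : Nat), i ≤ a.length →
    (aorScan k a s i).2 ≤ a.length := by
  intro s i hi
  induction h : a.length - i generalizing s i with
  | zero =>
    have hni : ¬ i < a.length := by omega
    rw [aorScan, dif_neg hni]
    exact hi
  | succ n ih =>
    rw [aorScan]
    split
    · split
      · exact ih _ _ (by omega) (by omega)
      · simpa using hi
    · simpa using hi

theorem nextQ_rotate (k : Int) (q : List Int) : ∃ i ≤ q.length, nextQ k q = q.rotate i := by
  unfold nextQ apply_one_round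
  by_cases hs : pySumA q ≤ k
  · refine ⟨0, by omega, ?_⟩
    simp [hs]
  · refine ⟨(aorScan k q 0 0).2, aorScan_le k q 0 0 (by omega), ?_⟩
    simp only [hs, if_false]
    rw [List.rotate_eq_drop_append_take (aorScan_le k q 0 0 (by omega))]

theorem stateRot (k : Int) (a : List Int) (t : Nat) : ∃ p, stateAt k a t = a.rotate p := by
  induction t with
  | zero => exact ⟨0, by simp [stateAt]⟩
  | succ t ih =>
    obtain ⟨p, hp⟩ := ih
    obtain ⟨i, _, hi⟩ := nextQ_rotate k (stateAt k a t)
    exact ⟨p + i, by rw [stateAt, hi, hp, List.rotate_rotate]⟩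

theorem statePeriod (k : Int) (a : List Int) {i j : Nat}
    (h : stateAt k a i = stateAt k a j) (m : Nat) :
    stateAt k a (i + m) = stateAt k a (j + m) := by
  induction m with
  | zero => simpa using h
  | succ m ih => rw [← Nat.add_assoc, ← Nat.add_assoc, stateAt, stateAt, ih]

theorem moneyShift (k : Int) (a : List Int) {i j : Nat}
    (h : stateAt k a i = stateAt k a j) (m : Nat) :
    moneyAt k a (j + m) = moneyAt k a (i + m) - moneyAt k a i + moneyAt k a j := by
  induction m with
  | zero => simp
  | succ m ih =>
    rw [← Nat.add_assoc, ← Nat.add_assoc, moneyAt, moneyAt, ih,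
      statePeriod k a h.symm m]
    ring

theorem moneyStep (k : Int) (a : List Int) {i j : Nat}
    (h : stateAt k a i = stateAt k a j) (hij : i ≤ j) {u : Nat} (hu : i ≤ u) :
    moneyAt k a (u + (j - i)) = moneyAt k a u + (moneyAt k a j - moneyAt k a i) := by
  have h1 := moneyShift k a h (u - i)
  have e1 : j + (u - i) = u + (j - i) := by omega
  have e2 : i + (u - i) = u := by omega
  rw [e1, e2] at h1
  omega

theorem shiftN (k : Int) (a : List Int) {i j : Nat}
    (h : stateAt k a i = stateAt k a j) (hij : i ≤ j) (n : Nat) {t : Nat} (ht : i ≤ t) :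
    moneyAt k a (t + n * (j - i)) =
      moneyAt k a t + n * (moneyAt k a j - moneyAt k a i) := by
  induction n with
  | zero => simp
  | succ n ih =>
    have e : t + (n + 1) * (j - i) = (t + n * (j - i)) + (j - i) := by ring
    rw [e, moneyStep k a h hij (by omega), ih]
    push_cast
    ring

theorem remGo_sim (k : Int) (a : List Int) : ∀ (cnt t : Nat) (m : Int),
    remGo k cnt (stateAt k a t) m = m + (moneyAt k a (t + cnt) - moneyAt k a t) := by
  intro cnt
  induction cnt with
  | zero => intro t m; simp [remGo]
  | succ n ih =>
    intro t m
    have : remGo k (n + 1) (stateAt k a t) m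
        = remGo k n (stateAt k a (t + 1)) (m + earnQ k (stateAt k a t)) := by
      simp [remGo, stateAt, nextQ, earnQ]
    rw [this, ih (t + 1)]
    have e : t + 1 + n = t + (n + 1) := by omega
    rw [e, moneyAt]
    ring

-- ---- the states list built by apply_N_rounds ----

theorem anr_eq (k : Int) (a : List Int) : ∀ (n t : Nat) (states : List (Int × List Int)),
    anrGo k n (stateAt k a t) (moneyAt k a t) states
      = states ++ (List.range n).map (fun j => (moneyAt k a (t + j), stateAt k a (t + j))) := by
  intro n
  induction n with
  | zero => intro t states; simp [anrGo]
  | succ n ih =>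
    intro t states
    have h1 : anrGo k (n + 1) (stateAt k a t) (moneyAt k a t) states
        = anrGo k n (stateAt k a (t + 1)) (moneyAt k a (t + 1))
            (states ++ [(moneyAt k a t, stateAt k a t)]) := by
      simp [anrGo, stateAt, moneyAt, nextQ, earnQ]
    rw [h1, ih (t + 1)]
    rw [List.range_succ_eq_map]
    simp [List.map_map, Function.comp_def, Nat.add_comm, Nat.add_assoc, Nat.add_left_comm]

theorem statesEq (k : Int) (a : List Int) :
    apply_N_rounds k a
      = (List.range (a.length + 10)).map (fun j => (moneyAt k a j, stateAt k a j)) := by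
  have := anr_eq k a (a.length + 10) 0 []
  simpa [apply_N_rounds, stateAt, moneyAt] using this

theorem statesLen (k : Int) (a : List Int) :
    (apply_N_rounds k a).length = a.length + 10 := by
  rw [statesEq]; simp

theorem statesGet (k : Int) (a : List Int) {j : Nat} (hj : j < a.length + 10) :
    (apply_N_rounds k a)[j]? = some (moneyAt k a j, stateAt k a j) := by
  rw [statesEq]
  rw [List.getElem?_map]
  simp [List.getElem?_range, hj]

-- ---- a repeat of the final state exists among the earlier states ----

theorem stateNil (k : Int) (t : Nat) : stateAt k [] t = [] := by
  induction t with
  | zero => simp [stateAt]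
  | succ t ih =>
    rw [stateAt, ih]
    simp [nextQ, apply_one_round, pySumA]
    split <;> simp [aorScan]

theorem moneyNil (k : Int) (t : Nat) : moneyAt k [] t = 0 := by
  induction t with
  | zero => simp [moneyAt]
  | succ t ih =>
    rw [moneyAt, ih, stateNil]
    simp [earnQ, apply_one_round, pySumA]
    split <;> simp [aorScan]

theorem existsRepeatEnd (k : Int) (a : List Int) :
    ∃ i ≤ a.length + 8, stateAt k a i = stateAt k a (a.length + 9) := by
  rcases Nat.eq_zero_or_pos a.length with hN | hN
  · have ha : a = [] := List.length_eq_zero_iff.mp hN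
    subst ha
    exact ⟨8, by omega, by rw [stateNil, stateNil]⟩
  · -- pigeonhole: all states are rotations of a, of which there are at most a.length
    set N := a.length with hNdef
    have hmaps : ∀ t : Fin (N + 1), stateAt k a t ∈ (Finset.range N).image (fun p => a.rotate p) := by
      intro t
      obtain ⟨p, hp⟩ := stateRot k a t
      refine Finset.mem_image.mpr ⟨p % N, Finset.mem_range.mpr (Nat.mod_lt _ hN), ?_⟩
      rw [List.rotate_mod, hp]
    have hcard : ((Finset.range N).image (fun p => a.rotate p)).card < (Finset.univ : Finset (Fin (N + 1))).card := by
      calc ((Finset.range N).image (fun p => a.rotate p)).card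
          ≤ (Finset.range N).card := Finset.card_image_le
        _ < N + 1 := by simp
        _ = (Finset.univ : Finset (Fin (N + 1))).card := by simp
    obtain ⟨x, _, y, _, hxy, hfeq⟩ :=
      Finset.exists_ne_map_eq_of_card_lt_of_maps_to hcard (fun t _ => hmaps t)
    -- order them
    rcases Nat.lt_or_ge (x : Nat) (y : Nat) with hlt | hge
    · refine ⟨x + (N + 9 - y), by have := y.isLt; omega, ?_⟩
      have := statePeriod k a hfeq (N + 9 - (y : Nat))
      rw [this]
      congr 1
      have := y.isLt; omega
    · have hlt : (y : Nat) < (x : Nat) := by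
        rcases Nat.lt_or_ge (y : Nat) (x : Nat) with h | h
        · exact h
        · exact absurd (Fin.ext (by omega)) hxy
      refine ⟨y + (N + 9 - x), by have := x.isLt; omega, ?_⟩
      have := statePeriod k a hfeq.symm (N + 9 - (x : Nat))
      rw [this]
      congr 1
      have := x.isLt; omega

-- ---- the backward repeat scan of A ----

theorem backScan_sim (k : Int) (a : List Int)
    (last : List Int) (hlast : last = stateAt k a (a.length + 9)) :
    ∀ (i : Nat), i < a.length + 10 →
    (∃ j ≤ i, stateAt k a j = last) → ∀ (fuel : Nat), i + 1 ≤ fuel →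
    ∃ res : Nat, backScan (apply_N_rounds k a) last (↑i) fuel = ↑res ∧ res ≤ i ∧
      stateAt k a res = last := by
  intro i
  induction i with
  | zero =>
    intro hi hex fuel hfuel
    obtain ⟨j, hj0, hjP⟩ := hex
    interval_cases j
    match fuel, hfuel with
    | fuel + 1, _ =>
      refine ⟨0, ?_, le_refl _, hjP⟩
      rw [backScan]
      have hg : PySem.List.pyGet? (apply_N_rounds k a) (↑(0 : Nat))
          = some (moneyAt k a 0, stateAt k a 0) := by
        rw [PySem.List.pyGet?_natCast, statesGet k a hi]
      simp only [Nat.cast_zero] at hg ⊢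
      rw [hg]
      simp [hjP]
  | succ m ih =>
    intro hi hex fuel hfuel
    match fuel, hfuel with
    | fuel + 1, hfuel =>
      rw [backScan]
      have hg : PySem.List.pyGet? (apply_N_rounds k a) (↑(m + 1 : Nat))
          = some (moneyAt k a (m + 1), stateAt k a (m + 1)) := by
        rw [PySem.List.pyGet?_natCast, statesGet k a hi]
      rw [hg]
      by_cases hP : stateAt k a (m + 1) = last
      · refine ⟨m + 1, ?_, le_refl _, hP⟩
        simp [hP]
      · have hstep : (↑(m + 1 : Nat) : Int) - 1 = (↑(m : Nat) : Int) := by push_cast; ring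
        simp only [hP, ne_eq, not_false_iff, if_true]
        rw [hstep]
        obtain ⟨j, hj, hjP⟩ := hex
        have hj' : j ≤ m := by
          rcases Nat.lt_or_ge j (m + 1) with h | h
          · omega
          · exfalso; have : j = m + 1 := by omega
            exact hP (this ▸ hjP)
        obtain ⟨res, h1, h2, h3⟩ := ih (by omega) ⟨j, hj', hjP⟩ fuel (by omega)
        exact ⟨res, h1, by omega, h3⟩

-- ---- A computes moneyAt R ----

theorem thmA' (R k : Int) (a : List Int) (hR : 0 ≤ R) :
    simulate_all_rounds R k a = moneyAt k a R.toNat := by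
  unfold simulate_all_rounds
  simp only [statesLen]
  by_cases hsmall : R ≤ ((a.length + 10 : Nat) : Int) - 1
  · -- direct lookup
    rw [if_pos (by exact_mod_cast hsmall)]
    have hg : PySem.List.pyGet? (apply_N_rounds k a) R
        = some (moneyAt k a R.toNat, stateAt k a R.toNat) := by
      rw [PySem.List.pyGet?_of_nonneg _ hR, statesGet k a (by omega)]
    rw [hg]
  · rw [if_neg (by exact_mod_cast hsmall)]
    have hRbig : ((a.length : Nat) : Int) + 9 < R := by push_cast at hsmall ⊢; omega
    -- states[-1]
    have hlast : PySem.List.pyGet? (apply_N_rounds k a) (-1)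
        = some (moneyAt k a (a.length + 9), stateAt k a (a.length + 9)) := by
      rw [PySem.List.pyGet?_neg_one, List.getLast?_eq_getElem?, statesLen]
      have : a.length + 10 - 1 = a.length + 9 := by omega
      rw [this, statesGet k a (by omega)]
    rw [hlast]
    dsimp only
    -- the backward scan
    obtain ⟨i0, hi0, hi0P⟩ := existsRepeatEnd k a
    have hstart : ((a.length + 10 : Nat) : Int) - 2 = ((a.length + 8 : Nat) : Int) := by
      push_cast; ring
    rw [hstart]
    obtain ⟨res, hres, hresle, hresP⟩ :=
      backScan_sim k a _ rfl (a.length + 8) (by omega) ⟨i0, hi0, hi0P⟩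
        (2 * (a.length + 10) + 2) (by omega)
    rw [hres]
    have hgres : PySem.List.pyGet? (apply_N_rounds k a) (↑res)
        = some (moneyAt k a res, stateAt k a res) := by
      rw [PySem.List.pyGet?_natCast, statesGet k a (by omega)]
    rw [hgres]
    dsimp only
    -- arithmetic of the cycle jump
    set Lnat : Nat := a.length + 9 - res with hLnat
    have hL : ((a.length + 10 : Nat) : Int) - 1 - (res : Int) = (Lnat : Int) := by
      push_cast; omega
    rw [hL]
    have hLpos : (0 : Int) < (Lnat : Int) := by
      have : 1 ≤ Lnat := by omega
      exact_mod_cast this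
    set n : Int := PySem.Int.floordiv (R - ↑res) (Lnat : Int) with hn
    have hfd : n * (Lnat : Int) + PySem.Int.mod (R - ↑res) (Lnat : Int) = R - ↑res :=
      PySem.Int.floordiv_mul_add_mod _ _
    have hmodnn : 0 ≤ PySem.Int.mod (R - ↑res) (Lnat : Int) := by
      rw [PySem.Int.mod_eq_emod_of_pos hLpos]
      exact Int.emod_nonneg _ (by omega)
    have hnnn : 0 ≤ n := by
      rw [hn, PySem.Int.floordiv_eq_ediv_of_pos hLpos]
      exact Int.ediv_nonneg (by push_cast at hRbig ⊢; omega) (by omega)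
    have hmore : 0 ≤ R - (↑res + n * (Lnat : Int)) := by omega
    -- run the remainder from the repeated state
    rw [← hresP, remGo_sim]
    -- identify R.toNat
    have hkey : R.toNat = res + (R - (↑res + n * (Lnat : Int))).toNat + n.toNat * Lnat := by
      have hcast : ((res + (R - (↑res + n * (Lnat : Int))).toNat + n.toNat * Lnat : Nat) : Int) = R := by
        push_cast
        rw [Int.toNat_of_nonneg hmore, Int.toNat_of_nonneg hnnn]
        ring
      omega
    rw [hkey, shiftN k a hresP (by omega) n.toNat (t := res + (R - (↑res + n * (Lnat : Int))).toNat) (by omega)]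
    rw [Int.toNat_of_nonneg hnnn]
    ring

-- ---- B-side: the per-position table agrees with the step function on rotations ----

theorem scan_agree (k : Int) (a : List Int) (p : Nat) (hp : p < a.length)
    (htot : k < a.sum) :
    ∀ (fuel i : Nat) (s : Int), i < a.length → a.length - i ≤ fuel →
      s = ((a.rotate p).take i).sum →
      bScan k a (↑a.length) (↑p) s (↑i) fuel
        = ((aorScan k (a.rotate p) s i).1, ↑((aorScan k (a.rotate p) s i).2)) := by
  intro fuel
  induction fuel with
  | zero => intro i s hi hfuel _; omega
  | succ fuel ih =>
    intro i s hi hfuel hs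
    have hmod : PySem.Int.mod ((p : Int) + (i : Int)) ((a.length : Nat) : Int)
        = (((p + i) % a.length : Nat) : Int) := by
      have hc : ((p : Int) + (i : Int)) = ((p + i : Nat) : Int) := by push_cast; ring
      rw [hc, PySem.Int.mod_natCast]
    have hidx : (p + i) % a.length < a.length := Nat.mod_lt _ (by omega)
    have hget : PySem.List.pyGet? a (((p + i) % a.length : Nat) : Int)
        = some a[(p + i) % a.length] := by
      rw [PySem.List.pyGet?_natCast]
      exact List.getElem?_eq_getElem hidx
    have helem : (a.rotate p)[i]'(by simpa using hi) = a[(p + i) % a.length] := by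
      rw [List.getElem_rotate]
      simp only [Nat.add_comm i p]
    rw [bScan, hmod, hget]
    dsimp only
    rw [aorScan]
    rw [dif_pos (by simpa using hi)]
    rw [helem]
    by_cases hguard : s + a[(p + i) % a.length] ≤ k
    · rw [if_pos hguard, if_pos hguard]
      have hlt : i + 1 < a.length := by
        rcases Nat.lt_or_ge (i + 1) a.length with h | h
        · exact h
        · exfalso
          have hi1 : i + 1 = a.length := by omega
          have : ((a.rotate p).take (i + 1)).sum = (a.rotate p).sum := by
            have : (a.rotate p).length = a.length := by simp
            rw [← this] at hi1
            rw [hi1, List.take_length]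
          have hsum : ((a.rotate p).take (i + 1)).sum = a.sum := by
            rw [this, (a.rotate_perm p).sum_eq]
          have hstep : ((a.rotate p).take (i + 1)).sum
              = ((a.rotate p).take i).sum + a[(p + i) % a.length] := by
            rw [← helem]
            exact List.sum_take_succ _ _ (by simpa using hi)
          omega
      have hcast : ((i : Int) + 1) = ((i + 1 : Nat) : Int) := by push_cast; ring
      rw [hcast]
      exact ih (i + 1) (s + a[(p + i) % a.length]) hlt (by omega)
        (by rw [hs, ← helem]; exact (List.sum_take_succ _ _ (by simpa using hi)).symm)
    · rw [if_neg hguard, if_neg hguard]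

theorem bTable_get (k : Int) (a : List Int) (htot : k < a.sum) {p : Nat} (hp : p < a.length) :
    ∃ np : Nat, np < a.length ∧
      (bTable k a (↑a.length))[p]? = some (earnQ k (a.rotate p), (np : Int)) ∧
      nextQ k (a.rotate p) = a.rotate np := by
  have hsum : (a.rotate p).sum = a.sum := (a.rotate_perm p).sum_eq
  have hknot : ¬ pySumA (a.rotate p) ≤ k := by rw [pySumA_eq, hsum]; omega
  have hscan := scan_agree k a p hp htot (a.length + 1) 0 0 (by omega) (by omega) (by simp)
  set iF : Nat := (aorScan k (a.rotate p) 0 0).2 with hiF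
  have hiFle : iF ≤ a.length := by
    have := aorScan_le k (a.rotate p) 0 0 (by omega)
    simpa using this
  refine ⟨(p + iF) % a.length, Nat.mod_lt _ (by omega), ?_, ?_⟩
  · unfold bTable
    rw [List.getElem?_map]
    have hNt : ((a.length : Int)).toNat = a.length := by simp
    rw [hNt, List.getElem?_range hp]
    simp only [Option.map_some]
    push_cast at hscan
    congr 1
    rw [hscan]
    dsimp only
    simp only [Prod.mk.injEq]
    constructor
    · simp [earnQ, apply_one_round, hknot]
    · have hc : ((p : Int) + (iF : Int)) = ((p + iF : Nat) : Int) := by push_cast; ring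
      rw [hc, PySem.Int.mod_natCast]
  · unfold nextQ apply_one_round
    rw [if_neg hknot]
    simp only
    rw [← hiF]
    have hlen : iF ≤ (a.rotate p).length := by simpa using hiFle
    rw [← List.rotate_eq_drop_append_take hlen, List.rotate_rotate, List.rotate_mod]

-- ---- the two loops of B ----

def LoopInv (k : Int) (a : List Int) (R : Int) (seen : PySem.Dict Int (Int × Int))
    (pos money r : Int) : Prop :=
  ∃ pn rn : Nat, pos = (pn : Int) ∧ r = (rn : Int) ∧ r ≤ R ∧ money = moneyAt k a rn ∧
    pn < a.length ∧ stateAt k a rn = a.rotate pn ∧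
    (∀ pk rm, seen.get? pk = some rm → ∃ p0 r0 : Nat, pk = (p0 : Int) ∧
      rm = ((r0 : Int), moneyAt k a r0) ∧ (r0 : Int) < r ∧ p0 < a.length ∧
      stateAt k a r0 = a.rotate p0)

theorem bLoop1_sim (k : Int) (a : List Int) (htot : k < a.sum) (R : Int) :
    ∀ (seen : PySem.Dict Int (Int × Int)) (pos money r : Int),
    LoopInv k a R seen pos money r →
    ∃ seen' pos' money' r',
      bLoop1 R (bTable k a (↑a.length)) seen pos money r = (seen', pos', money', r') ∧
      LoopInv k a R seen' pos' money' r' ∧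
      (r' = R ∨ (r' < R ∧ seen'.contains pos' = true)) := by
  intro seen pos money r hInv
  induction hfuel : (R - r).toNat using Nat.strong_induction_on generalizing seen pos money r with
  | _ fuel ih =>
  obtain ⟨pn, rn, hpos, hr, hrR, hmoney, hpn, hst, hseen⟩ := hInv
  rw [bLoop1]
  by_cases hguard : r < R ∧ ¬ seen.contains pos = true
  · rw [dif_pos hguard]
    obtain ⟨np, hnp, hget, hnext⟩ := bTable_get k a htot hpn
    have hget' : PySem.List.pyGet? (bTable k a (↑a.length)) pos
        = some (earnQ k (a.rotate pn), (np : Int)) := by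
      rw [hpos, PySem.List.pyGet?_natCast, hget]
    rw [hget']
    have hInv' : LoopInv k a R (seen.insert pos (r, money)) (np : Int)
        (money + earnQ k (a.rotate pn)) (r + 1) := by
      refine ⟨np, rn + 1, rfl, by omega, by omega, ?_, hnp, ?_, ?_⟩
      · rw [hmoney, ← hst, moneyAt]
      · rw [stateAt, ← hnext, hst]
      · intro pk rm hpk
        rw [PySem.Dict.get?_insert] at hpk
        split_ifs at hpk with heq
        · obtain rfl : (r, money) = rm := by injection hpk
          exact ⟨pn, rn, heq ▸ hpos, by rw [hr, hmoney], by omega, hpn, hst⟩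
        · obtain ⟨p0, r0, h1, h2, h3, h4, h5⟩ := hseen pk rm hpk
          exact ⟨p0, r0, h1, h2, by omega, h4, h5⟩
    exact ih (R - (r + 1)).toNat (by omega) _ _ _ _ hInv' rfl
  · rw [dif_neg hguard]
    refine ⟨seen, pos, money, r, rfl, ⟨pn, rn, hpos, hr, hrR, hmoney, hpn, hst, hseen⟩, ?_⟩
    rcases Decidable.not_and_iff_not_or_not.mp hguard with h | h
    · left; omega
    · by_cases hrR' : r < R
      · right; exact ⟨hrR', by simpa using h⟩
      · left; omega

theorem bLoop2_sim (k : Int) (a : List Int) (htot : k < a.sum) (R : Int) :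
    ∀ (r : Int) (t pn : Nat) (money : Int), 0 ≤ r → pn < a.length →
    stateAt k a t = a.rotate pn →
    bLoop2 R (bTable k a (↑a.length)) (pn : Int) money r
      = money + (moneyAt k a (t + (R - r).toNat) - moneyAt k a t) := by
  intro r t pn money hr hpn hst
  induction hfuel : (R - r).toNat using Nat.strong_induction_on generalizing r t pn money with
  | _ fuel ih =>
  rw [bLoop2]
  by_cases hguard : r < R
  · rw [dif_pos hguard]
    obtain ⟨np, hnp, hget, hnext⟩ := bTable_get k a htot hpn
    have hget' : PySem.List.pyGet? (bTable k a (↑a.length)) (pn : Int)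
        = some (earnQ k (a.rotate pn), (np : Int)) := by
      rw [PySem.List.pyGet?_natCast, hget]
    rw [hget']
    dsimp only
    have hst' : stateAt k a (t + 1) = a.rotate np := by
      rw [stateAt, ← hnext, hst]
    have hrec := ih (R - (r + 1)).toNat (by omega) (r + 1) (t + 1) np
      (money + earnQ k (a.rotate pn)) (by omega) hnp hst' rfl
    rw [hrec]
    have he : t + 1 + (R - (r + 1)).toNat = t + fuel := by omega
    rw [he]
    have hm : moneyAt k a (t + 1) = moneyAt k a t + earnQ k (a.rotate pn) := by
      rw [moneyAt, hst]
    omega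
  · rw [dif_neg hguard]
    have hz : fuel = 0 := by omega
    rw [hz]
    simp

-- ---- B computes moneyAt R ----

theorem moneyConst (k : Int) (a : List Int) (hk : a.sum ≤ k) (t : Nat) :
    stateAt k a t = a ∧ moneyAt k a t = t * a.sum := by
  induction t with
  | zero => simp [stateAt, moneyAt]
  | succ t ih =>
    obtain ⟨h1, h2⟩ := ih
    have hs : pySumA a ≤ k := by rw [pySumA_eq]; exact hk
    constructor
    · rw [stateAt, h1, nextQ, apply_one_round, if_pos hs]
    · rw [moneyAt, h1, h2, earnQ, apply_one_round, if_pos hs]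
      simp [pySumA_eq]
      push_cast
      ring

theorem thmB' (R k : Int) (a : List Int) (hR : 0 ≤ R) :
    simulate_all_rounds_alt R k a = moneyAt k a R.toNat := by
  unfold simulate_all_rounds_alt
  by_cases h0 : R ≤ 0 ∨ (a.length : Int) = 0
  · rw [if_pos h0]
    rcases h0 with h | h
    · have : R = 0 := by omega
      rw [this]
      simp [moneyAt]
    · have ha : a = [] := List.length_eq_zero_iff.mp (by exact_mod_cast h)
      rw [ha, moneyNil]
  · rw [if_neg h0]
    push_neg at h0
    obtain ⟨hRpos, hNpos⟩ := h0
    have hN : 0 < a.length := by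
      rcases Nat.eq_zero_or_pos a.length with h | h
      · exact absurd (by exact_mod_cast h) hNpos
      · exact h
    by_cases htot : a.foldl (· + ·) 0 ≤ k
    · rw [if_pos htot]
      have hfold : a.foldl (· + ·) 0 = a.sum := by simp [List.sum_eq_foldl]
      have hsum : a.sum ≤ k := by rw [← hfold]; exact htot
      rw [(moneyConst k a hsum R.toNat).2, Int.toNat_of_nonneg hR, hfold]
    · rw [if_neg htot]
      have hsum : k < a.sum := by
        have hfold : a.foldl (· + ·) 0 = a.sum := by simp [List.sum_eq_foldl]
        omega
      have hInv0 : LoopInv k a R PySem.Dict.empty 0 0 0 := by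
        refine ⟨0, 0, by simp, by simp, by omega, by simp [moneyAt], hN, by simp [stateAt], ?_⟩
        intro pk rm hpk
        rw [PySem.Dict.get?_empty] at hpk
        exact absurd hpk (by simp)
      obtain ⟨seen', pos', money', r', hloop, hInv', hexit⟩ :=
        bLoop1_sim k a hsum R PySem.Dict.empty 0 0 0 hInv0
      dsimp only
      rw [hloop]
      dsimp only
      obtain ⟨pn, rn, hpos, hr, hrR, hmoney, hpn, hst, hseen⟩ := hInv'
      rcases hexit with hdone | ⟨hlt, hcont⟩
      · -- the loop consumed all R rounds
        rw [if_neg (by omega), hmoney]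
        congr 1
        omega
      · rw [if_pos hlt]
        -- the dictionary lookup succeeds
        have hcontains := hcont
        rw [PySem.Dict.contains_eq_isSome_get?] at hcontains
        obtain ⟨rm, hrm⟩ := Option.isSome_iff_exists.mp hcontains
        rw [hrm]
        obtain ⟨p0, r0, hpk0, hrm0, hr0lt, hp0, hst0⟩ := hseen pos' rm hrm
        -- same position ⇒ same state ⇒ a repeat
        have hpeq : p0 = pn := by
          rw [hpos] at hpk0
          exact_mod_cast hpk0.symm
        rw [hpeq] at hst0
        have hrep : stateAt k a r0 = stateAt k a rn := by rw [hst0, hst]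
        rw [hrm0]
        dsimp only
        set cyc : Int := r' - (r0 : Int) with hcyc
        have hcycpos : (0 : Int) < cyc := by omega
        set n : Int := PySem.Int.floordiv (R - r') cyc with hn
        have hfd : n * cyc + PySem.Int.mod (R - r') cyc = R - r' :=
          PySem.Int.floordiv_mul_add_mod _ _
        have hmodnn : 0 ≤ PySem.Int.mod (R - r') cyc := by
          rw [PySem.Int.mod_eq_emod_of_pos hcycpos]
          exact Int.emod_nonneg _ (by omega)
        have hmodlt : PySem.Int.mod (R - r') cyc < cyc := by
          rw [PySem.Int.mod_eq_emod_of_pos hcycpos]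
          exact Int.emod_lt_of_pos _ hcycpos
        have hnnn : 0 ≤ n := by
          rw [hn, PySem.Int.floordiv_eq_ediv_of_pos hcycpos]
          exact Int.ediv_nonneg (by omega) (by omega)
        rw [hpos]
        rw [bLoop2_sim k a hsum R (r' + n * cyc) rn pn
          (money' + n * (money' - moneyAt k a r0)) (by omega) hpn hst]
        -- identify R.toNat and close with shiftN
        have hcycnat : cyc = ((rn - r0 : Nat) : Int) := by push_cast; omega
        have hkey : R.toNat = rn + (R - (r' + n * cyc)).toNat + n.toNat * (rn - r0) := by
          have hcast : ((rn + (R - (r' + n * cyc)).toNat + n.toNat * (rn - r0) : Nat) : Int) = R := by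
            push_cast
            rw [Int.toNat_of_nonneg (by omega : (0:Int) ≤ R - (r' + n * cyc)),
              Int.toNat_of_nonneg hnnn, ← hcycnat]
            push_cast
            rw [← hr]
            ring
          omega
        rw [hkey, shiftN k a hrep (by omega) n.toNat (t := rn + (R - (r' + n * cyc)).toNat) (by omega)]
        rw [Int.toNat_of_nonneg hnnn, hmoney]
        ring

theorem thmA (R k : Int) (a : List Int) (hpre : Pre_simulate_all_rounds R k a)
    (hR : 0 ≤ R) : simulate_all_rounds R k a = moneyAt k a R.toNat :=
  thmA' R k a hR

theorem thmB (R k : Int) (a : List Int) (hpre : Pre_simulate_all_rounds R k a)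
    (hR : 0 ≤ R) : simulate_all_rounds_alt R k a = moneyAt k a R.toNat :=
  thmB' R k a hR

-- ===== VERDICT (by name: the statement is the Claim_ definition above) =====
theorem simulate_all_rounds_spec : Claim_unchanged_simulate_all_rounds := by
  intro R k a _ hpre
  unfold Spec_simulate_all_rounds D_simulate_all_rounds
  intro hnD
  rw [thmA R k a hpre (by omega), thmB R k a hpre (by omega)]

theorem simulate_all_rounds_changed : Claim_changed_simulate_all_rounds := by
  unfold Claim_changed_simulate_all_rounds; decide
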